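-- pv_equiv track=rewrite | github.com/grigs28/ak47 | app/scan.py | _split_files_for_threads
-- ===== SOURCE A (Python) =====
-- def _split_files_for_threads(pdfs, num_threads=3):
--     """将PDF文件按范围分配给N个线程
--     均分策略：每10个文件为一组，按线程数均分
--     2线程: A(0-4), B(5-9)
--     3线程: A(0-3), B(4-6), C(7-9)
--     4线程: A(0-2), B(3-4), C(5-7), D(8-9)
--     """
--     # 生成线程ID列表
--     thread_ids = [chr(ord('A') + i) for i in range(num_threads)]
--     groups = {tid: [] for tid in thread_ids}
--
--     # 每10个文件为一组，计算每个线程分到的数量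
--     files_per_cycle = 10
--     files_per_thread = files_per_cycle // num_threads
--     remainder = files_per_cycle % num_threads
--
--     for idx, pdf in enumerate(pdfs):
--         pos_in_cycle = idx % files_per_cycle
--
--         # 计算该位置属于哪个线程
--         assigned_thread = 0
--         boundary = 0
--         for t in range(num_threads):
--             # 前 remainder 个线程多分1个
--             chunk_size = files_per_thread + (1 if t < remainder else 0)
--             boundary += chunk_size
--             if pos_in_cycle < boundary:
--                 assigned_thread = t
--                 break
--
--         groups[thread_ids[assigned_thread]].append(pdf)
--
--     return groups
-- ===== SOURCE B (Python) =====
-- def _split_files_for_threads(pdfs, num_threads=3):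
--     """Same distribution as A, but the per-position thread owner is computed
--     once into a 10-slot lookup table instead of rescanning threads per file."""
--     thread_ids = [chr(ord('A') + i) for i in range(num_threads)]
--     groups = {tid: [] for tid in thread_ids}
--
--     q, r = divmod(10, num_threads)
--     owner = []
--     for t in range(num_threads):
--         owner += [thread_ids[t]] * (q + (1 if t < r else 0))
--
--     for idx, pdf in enumerate(pdfs):
--         groups[owner[idx % 10]].append(pdf)
--
--     return groups
-- ===== Notes on version B (the rewrite author's own statement) =====
-- stated objective: faster
-- what changed: A rescans the thread boundaries for every file; B precomputes a 10-slot owner lookup table once (one boundary pass) and assigns each file with a single table lookup, keeping thread ids and the groups dict exactly as A builds them.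
import Mathlib
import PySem

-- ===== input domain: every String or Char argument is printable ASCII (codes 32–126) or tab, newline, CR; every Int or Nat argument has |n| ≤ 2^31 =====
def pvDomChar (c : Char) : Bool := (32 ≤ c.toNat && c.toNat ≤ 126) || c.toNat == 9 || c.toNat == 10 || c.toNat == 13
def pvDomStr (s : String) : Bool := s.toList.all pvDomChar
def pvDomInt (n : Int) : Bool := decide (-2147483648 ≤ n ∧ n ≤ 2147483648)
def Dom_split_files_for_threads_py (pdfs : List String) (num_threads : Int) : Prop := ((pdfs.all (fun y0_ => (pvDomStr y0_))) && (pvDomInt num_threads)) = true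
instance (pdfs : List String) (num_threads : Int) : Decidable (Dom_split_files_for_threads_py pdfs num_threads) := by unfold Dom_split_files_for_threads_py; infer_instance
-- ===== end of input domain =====

-- ===== PORT A =====
-- B re-implements A's per-file inner thread scan as a 10-slot owner table built once; equal output proved on Pre_.

-- chr(65+i): exact for code points below 0xD800 (every code Pre_ admits; Lean Char has no surrogates)
def pyChr (n : Int) : String := String.ofList [Char.ofNat n.toNat]

-- the inner 'for t in range(num_threads): ... if pos_in_cycle < boundary: assigned_thread = t; break'
-- loop of A: returns some t at the break, none if the loop falls through (assigned_thread then keeps its initial 0)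
def scanAssignA (fpt rem pos : Int) : List Int → Int → Option Int
  | [], _ => none
  | t :: ts, boundary =>
    let chunk := fpt + (if t < rem then (1 : Int) else 0)
    if pos < boundary + chunk then some t else scanAssignA fpt rem pos ts (boundary + chunk)

def split_files_for_threads_py (pdfs : List String) (num_threads : Int) : List (String × List String) :=
  let thread_ids := (PySem.List.pyRange 0 num_threads 1).map (fun i => pyChr (65 + i))
  let groups : PySem.Dict String (List String) :=
    thread_ids.foldl (fun d tid => d.insert tid []) PySem.Dict.empty
  let files_per_thread := PySem.Int.floordiv 10 num_threads  -- num_threads ≠ 0 by Pre_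
  let remainder := PySem.Int.mod 10 num_threads
  let final := (PySem.List.enumerate pdfs 0).foldl (fun g p =>
      let pos_in_cycle := PySem.Int.mod p.1 10
      let assigned := (scanAssignA files_per_thread remainder pos_in_cycle
                        (PySem.List.pyRange 0 num_threads 1) 0).getD 0
      -- thread_ids[assigned]: under Pre_ always in range (0 ≤ assigned < num_threads), so pyGetD is exact;
      -- groups[key].append(pdf): the key is always already present, so Dict.modify is exact
      g.modify (PySem.List.pyGetD thread_ids assigned "") [] (· ++ [p.2])) groups
  final.items

-- ===== PORT B =====
def split_files_for_threads_py_alt (pdfs : List String) (num_threads : Int) : List (String × List String) :=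
  let thread_ids := (PySem.List.pyRange 0 num_threads 1).map (fun i => pyChr (65 + i))
  let groups : PySem.Dict String (List String) :=
    thread_ids.foldl (fun d tid => d.insert tid []) PySem.Dict.empty
  let q := PySem.Int.floordiv 10 num_threads  -- num_threads ≠ 0 by Pre_
  let r := PySem.Int.mod 10 num_threads
  -- owner += [thread_ids[t]] * (q + (1 if t < r else 0)); thread_ids[t] in range, so pyGetD is exact
  let owner := (PySem.List.pyRange 0 num_threads 1).foldl (fun acc t =>
      acc ++ PySem.List.pyRepeat [PySem.List.pyGetD thread_ids t ""]
               (q + (if t < r then (1 : Int) else 0))) []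
  -- owner[idx % 10]: under Pre_ (and pdfs ≠ []) owner has exactly 10 entries, so pyGetD is exact
  let final := (PySem.List.enumerate pdfs 0).foldl (fun g p =>
      g.modify (PySem.List.pyGetD owner (PySem.Int.mod p.1 10) "") [] (· ++ [p.2])) groups
  final.items

-- ===== PRECONDITION & SPEC =====
-- Pre_ excludes: num_threads = 0 (A raises ZeroDivisionError); num_threads < 0 with pdfs ≠ [] (A raises
-- IndexError); num_threads ≥ 1114048 (chr raises ValueError); and 55232 ≤ num_threads ≤ 1114047, where A
-- returns a dict whose keys include lone-surrogate code points, which a Lean String cannot represent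
-- (B returns the identical value on all such inputs).
def Pre_split_files_for_threads_py (pdfs : List String) (num_threads : Int) : Prop :=
  num_threads ≠ 0 ∧ num_threads ≤ 55231 ∧ (num_threads < 0 → pdfs = [])
instance (pdfs : List String) (num_threads : Int) : Decidable (Pre_split_files_for_threads_py pdfs num_threads) := by
  unfold Pre_split_files_for_threads_py; infer_instance

def pvWitness_split_files_for_threads_py : List String × Int := (["a.pdf", "b.pdf", "c.pdf", "d.pdf"], 3)

def Spec_split_files_for_threads_py (pdfs : List String) (num_threads : Int) (out : List (String × List String)) : Prop := out = split_files_for_threads_py_alt pdfs num_threads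
instance (pdfs : List String) (num_threads : Int) (out : List (String × List String)) : Decidable (Spec_split_files_for_threads_py pdfs num_threads out) := by unfold Spec_split_files_for_threads_py; infer_instance

-- ===== CLAIM (what is proved, stated in full; the proofs are below) =====
def Claim_equal_split_files_for_threads_py : Prop := ∀ (pdfs : List String) (num_threads : Int), Dom_split_files_for_threads_py pdfs num_threads → Pre_split_files_for_threads_py pdfs num_threads → Spec_split_files_for_threads_py pdfs num_threads (split_files_for_threads_py pdfs num_threads)

-- ===== LEMMAS AND PROOFS =====

-- once A's break fires inside a prefix of the range, the rest of the range is never visited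
theorem scanAssignA_append (fpt rem pos : Int) (l1 l2 : List Int) (b t : Int)
    (h : scanAssignA fpt rem pos l1 b = some t) :
    scanAssignA fpt rem pos (l1 ++ l2) b = some t := by
  induction l1 generalizing b with
  | nil => simp [scanAssignA] at h
  | cons x xs ih =>
    simp only [List.cons_append, scanAssignA] at h ⊢
    by_cases hc : pos < b + (fpt + (if x < rem then (1 : Int) else 0))
    · simp only [if_pos hc] at h ⊢; exact h
    · simp only [if_neg hc] at h ⊢; exact ih _ h

-- with ≥ 11 threads each of the first 10 threads owns exactly one position: the scan breaks at t = pos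
theorem scanAssignA_big (pos : Int) (h0 : 0 ≤ pos) (h9 : pos < 10) :
    scanAssignA 0 10 pos (PySem.List.pyRange 0 10 1) 0 = some pos := by
  interval_cases pos <;> decide

-- threads t ≥ 10 contribute an empty chunk to the owner table (chunk = 0 + 0)
theorem owner_skip_tail (tids : List String) (l : List Int) (acc : List String)
    (h : ∀ t ∈ l, (10 : Int) ≤ t) :
    l.foldl (fun acc t =>
      acc ++ PySem.List.pyRepeat [PySem.List.pyGetD tids t ""]
               ((0 : Int) + (if t < (10 : Int) then (1 : Int) else 0))) acc = acc := by
  induction l generalizing acc with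
  | nil => rfl
  | cons x xs ih =>
    have hx : ¬ x < (10 : Int) := by have := h x (by simp); omega
    rw [List.foldl_cons]
    have hstep : acc ++ PySem.List.pyRepeat [PySem.List.pyGetD tids x ""]
        ((0 : Int) + (if x < (10 : Int) then (1 : Int) else 0)) = acc := by
      simp [if_neg hx, PySem.List.pyRepeat_singleton]
    rw [hstep]
    exact ih acc (fun t ht => h t (List.mem_cons_of_mem _ ht))

-- the key A picks equals the key B looks up, for every thread count ≥ 1 and cycle position
theorem key_eq (n pos : Int) (hn : 1 ≤ n) (h0 : 0 ≤ pos) (h9 : pos < 10) :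
    PySem.List.pyGetD ((PySem.List.pyRange 0 n 1).map (fun i => pyChr (65 + i)))
      ((scanAssignA (PySem.Int.floordiv 10 n) (PySem.Int.mod 10 n) pos
        (PySem.List.pyRange 0 n 1) 0).getD 0) ""
    = PySem.List.pyGetD
        ((PySem.List.pyRange 0 n 1).foldl (fun acc t =>
          acc ++ PySem.List.pyRepeat
            [PySem.List.pyGetD ((PySem.List.pyRange 0 n 1).map (fun i => pyChr (65 + i))) t ""]
            (PySem.Int.floordiv 10 n + (if t < PySem.Int.mod 10 n then (1 : Int) else 0))) [])
        pos "" := by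
  by_cases hbig : 11 ≤ n
  · -- q = 0, r = 10
    have hq : PySem.Int.floordiv 10 n = 0 := by
      rw [PySem.Int.floordiv_eq_iff_of_pos (by omega)]; omega
    have hr : PySem.Int.mod 10 n = 10 := by
      have h2 := PySem.Int.floordiv_mul_add_mod 10 n
      rw [hq] at h2; omega
    have hsplit : PySem.List.pyRange 0 n 1
        = PySem.List.pyRange 0 10 1 ++ PySem.List.pyRange 10 n 1 :=
      PySem.List.pyRange_one_append 0 10 n (by omega) (by omega)
    rw [hq, hr, hsplit]
    rw [List.foldl_append]
    rw [owner_skip_tail _ _ _ (fun t ht => ((PySem.List.mem_pyRange_one).mp ht).1)]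
    rw [scanAssignA_append _ _ _ _ _ _ _ (scanAssignA_big pos h0 h9)]
    have hten : PySem.List.pyRange 0 10 1 = [0,1,2,3,4,5,6,7,8,9] := by decide
    rw [hten]
    set tids := (PySem.List.pyRange 0 10 1 ++ PySem.List.pyRange 10 n 1).map (fun i => pyChr (65 + i)) with htids
    simp only [List.foldl_cons, List.foldl_nil, PySem.List.pyRepeat_singleton]
    norm_num
    interval_cases pos <;> simp [PySem.List.pyGetD_ofNat']
  · -- 1 ≤ n ≤ 10: finitely many thread counts, finitely many positions
    interval_cases n <;> interval_cases pos <;> decide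

-- ===== VERDICT (by name: the statement is the Claim_ definition above) =====
theorem split_files_for_threads_py_spec : Claim_equal_split_files_for_threads_py := by
  intro pdfs n _hdom hpre
  obtain ⟨hne, _hle, hneg⟩ := hpre
  unfold Spec_split_files_for_threads_py
  unfold split_files_for_threads_py split_files_for_threads_py_alt
  by_cases hn : 1 ≤ n
  · simp only []
    apply congrArg PySem.Dict.items
    apply PySem.List.foldl_congr_mem
    intro acc p hp
    obtain ⟨k, hk, rfl⟩ := (PySem.List.mem_enumerate_iff _ _ _).mp hp
    dsimp only
    rw [key_eq n (PySem.Int.mod (0 + (k : Int)) 10) hn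
        (PySem.Int.mod_nonneg _ (by omega)) (PySem.Int.mod_lt _ (by omega))]
  · have hpdfs : pdfs = [] := hneg (by omega)
    subst hpdfs
    simp [PySem.List.enumerate]
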